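-- pv_equiv track=rewrite | github.com/yaggul/Programming-101_4-Python | Dive-Into_python/diveintopython.py | matrix_bombing_plan
-- ===== SOURCE A (Python) =====
-- def sum_matrix(m):
--     summ = 0
--     for i in m:
--         for j in i:
--             summ += j
--     return summ
--
-- def find_neighbors(x, y, rows, columns):
--     res = []
--     for i in (x - 1, x, x + 1):
--         for j in (y - 1, y, y + 1):
--             if rows > i >= 0 and columns > j >= 0 and (i, j) != (x, y):
--                 res += [(i, j)]
--             else:
--                 pass
--     return res
--
-- def matrix_bombing_plan(m):
--     from copy import deepcopy
--     rows = len(m)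
--     columns = len(m[0])
--     positions = {(i, j): m[i][j] for i in range(rows) for j in range(columns)}
--     res = {}
--     bomb_values = positions
--     for row in range(rows):
--         for column in range(columns):
--             bombed_m = deepcopy(m)
--             for i, j in find_neighbors(row, column, rows, columns):
--                 bombed_m[i][j] -= bomb_values[(row, column)]
--                 if bombed_m[i][j] < 0:
--                     bombed_m[i][j] = 0
--                 else:
--                     pass
--             res[row, column] = sum_matrix(bombed_m)
--     return res
-- ===== SOURCE B (Python) =====
-- def matrix_bombing_plan(m):
--     rows = len(m)
--     columns = len(m[0])
--     total = 0
--     for row in m: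
--         for v in row:
--             total += v
--     res = {}
--     for r in range(rows):
--         for c in range(columns):
--             v = m[r][c]
--             reduction = 0
--             for i in (r - 1, r, r + 1):
--                 for j in (c - 1, c, c + 1):
--                     if rows > i >= 0 and columns > j >= 0 and (i, j) != (r, c):
--                         reduction += min(v, m[i][j])
--             res[r, c] = total - reduction
--     return res
-- ===== Notes on version B (the rewrite author's own statement) =====
-- stated objective: faster
-- what changed: Replaces A's per-cell deepcopy + bomb-neighbours + full matrix re-sum (O((r*c)^2)) by one precomputed total sum minus the <=8 per-neighbour reductions min(v, neighbour) for each cell (O(r*c)).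
import Mathlib
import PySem

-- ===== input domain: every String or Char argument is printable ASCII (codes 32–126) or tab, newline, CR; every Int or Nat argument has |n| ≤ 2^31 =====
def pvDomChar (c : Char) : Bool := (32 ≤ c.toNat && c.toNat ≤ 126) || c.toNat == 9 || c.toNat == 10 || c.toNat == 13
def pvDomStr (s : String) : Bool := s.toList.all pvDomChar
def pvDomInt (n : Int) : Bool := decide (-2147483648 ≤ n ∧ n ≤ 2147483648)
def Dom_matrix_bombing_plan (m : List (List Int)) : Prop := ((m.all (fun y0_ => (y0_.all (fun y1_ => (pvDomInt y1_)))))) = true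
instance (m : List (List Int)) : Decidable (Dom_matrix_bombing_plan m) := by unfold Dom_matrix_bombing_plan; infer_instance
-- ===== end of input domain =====

-- B replaces A's per-cell deepcopy-bomb-and-resum (O((r·c)²)) by one precomputed total sum
-- minus the ≤8 neighbour reductions min(v, cell) per cell (O(r·c)); return value only (A mutates nothing visible).

-- ===== PORT A =====
-- cell read m[i][j]; the .getD defaults are unreachable at the in-range indices A uses (guarded by find_neighbors / range bounds)
def pvGet2 (m : List (List Int)) (i j : Int) : Int :=
  (PySem.List.pyGet? ((PySem.List.pyGet? m i).getD []) j).getD 0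

-- bombed_m[i][j] -= v; if bombed_m[i][j] < 0: bombed_m[i][j] = 0 — exact at the nonneg in-range indices find_neighbors yields
def pvUpd (mm : List (List Int)) (i j v : Int) : List (List Int) :=
  mm.modify i.toNat (fun row => row.modify j.toNat (fun x => if x - v < 0 then 0 else x - v))

def pvSumMatrix (m : List (List Int)) : Int :=
  m.foldl (fun summ i => i.foldl (fun summ j => summ + j) summ) 0

def pvFindNeighbors (x y rows columns : Int) : List (Int × Int) :=
  [x - 1, x, x + 1].foldl (fun res i =>
    [y - 1, y, y + 1].foldl (fun res j =>
      if rows > i ∧ i ≥ 0 ∧ columns > j ∧ j ≥ 0 ∧ (i, j) ≠ (x, y) then res ++ [(i, j)] else res) res) []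

def matrix_bombing_plan (m : List (List Int)) : List (Int × Int × Int) :=
  let rows : Int := m.length
  let columns : Int := ((PySem.List.pyGet? m 0).getD []).length
  let positions : PySem.Dict (Int × Int) Int :=
    (PySem.List.pyRange 0 rows 1).foldl (fun d i =>
      (PySem.List.pyRange 0 columns 1).foldl (fun d j => d.insert (i, j) (pvGet2 m i j)) d)
      PySem.Dict.empty
  let bomb_values := positions
  let res : PySem.Dict (Int × Int) Int :=
    (PySem.List.pyRange 0 rows 1).foldl (fun res row =>
      (PySem.List.pyRange 0 columns 1).foldl (fun res column =>
        let bombed_m :=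
          (pvFindNeighbors row column rows columns).foldl
            (fun mm p => pvUpd mm p.1 p.2 (bomb_values.getD (row, column) 0)) m
        res.insert (row, column) (pvSumMatrix bombed_m)) res)
      PySem.Dict.empty
  res.items.map (fun p => (p.1.1, p.1.2, p.2))

-- ===== PORT B =====
def matrix_bombing_plan_alt (m : List (List Int)) : List (Int × Int × Int) :=
  let rows : Int := m.length
  let columns : Int := ((PySem.List.pyGet? m 0).getD []).length
  let total : Int := m.foldl (fun t row => row.foldl (fun t v => t + v) t) 0
  let res : PySem.Dict (Int × Int) Int :=
    (PySem.List.pyRange 0 rows 1).foldl (fun res r =>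
      (PySem.List.pyRange 0 columns 1).foldl (fun res c =>
        let v := pvGet2 m r c
        let reduction :=
          [r - 1, r, r + 1].foldl (fun red i =>
            [c - 1, c, c + 1].foldl (fun red j =>
              if rows > i ∧ i ≥ 0 ∧ columns > j ∧ j ≥ 0 ∧ (i, j) ≠ (r, c)
              then red + min v (pvGet2 m i j) else red) red) 0
        res.insert (r, c) (total - reduction)) res)
      PySem.Dict.empty
  res.items.map (fun p => (p.1.1, p.1.2, p.2))

-- ===== PRECONDITION & SPEC =====
-- A raises IndexError on an empty outer list (it reads its first row) and whenever some row is shorter than the first row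
-- (the comprehension reads m[i][j] for every j < len(m[0])); exactly those inputs are excluded.
def Pre_matrix_bombing_plan (m : List (List Int)) : Prop :=
  m ≠ [] ∧ ∀ r ∈ m, ((PySem.List.pyGet? m 0).getD []).length ≤ r.length
instance (m : List (List Int)) : Decidable (Pre_matrix_bombing_plan m) := by
  unfold Pre_matrix_bombing_plan; infer_instance

def pvWitness_matrix_bombing_plan : List (List Int) := [[1, 2], [3, 4]]

def Spec_matrix_bombing_plan (m : List (List Int)) (out : List (Int × Int × Int)) : Prop := out = matrix_bombing_plan_alt m
instance (m : List (List Int)) (out : List (Int × Int × Int)) : Decidable (Spec_matrix_bombing_plan m out) := by unfold Spec_matrix_bombing_plan; infer_instance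

-- ===== CLAIM (what is proved, stated in full; the proofs are below) =====
def Claim_equal_matrix_bombing_plan : Prop := ∀ (m : List (List Int)), Dom_matrix_bombing_plan m → Pre_matrix_bombing_plan m → Spec_matrix_bombing_plan m (matrix_bombing_plan m)

-- ===== LEMMAS AND PROOFS =====

-- sum_matrix is the sum of row sums
lemma pvSumMatrix_eq (m : List (List Int)) : pvSumMatrix m = (m.map List.sum).sum := by
  have hrow : ∀ (r : List Int) (s : Int), r.foldl (fun a b => a + b) s = s + r.sum := by
    intro r s; exact (PySem.List.foldl_add r id s).trans (by simp)
  suffices h : ∀ (mm : List (List Int)) (s : Int),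
      mm.foldl (fun summ i => i.foldl (fun summ j => summ + j) summ) s = s + (mm.map List.sum).sum by
    simpa using h m 0
  intro mm
  induction mm with
  | nil => simp
  | cons r t ih => intro s; simp [List.foldl_cons, hrow, PySem.List.foldl_add, add_assoc]

-- the candidate cells A's and B's 3×3 loops run over, row-major
def pvCand (x y : Int) : List (Int × Int) :=
  [(x-1, y-1), (x-1, y), (x-1, y+1), (x, y-1), (x, y), (x, y+1), (x+1, y-1), (x+1, y), (x+1, y+1)]

-- reading an untouched cell through an update
lemma pvGet2_nonneg (m : List (List Int)) (i j : Int) (hi : 0 ≤ i) (hj : 0 ≤ j) :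
    pvGet2 m i j = ((m[i.toNat]?.getD [])[j.toNat]?.getD 0) := by
  unfold pvGet2
  rw [show i = ((i.toNat : Nat) : Int) by omega, show j = ((j.toNat : Nat) : Int) by omega]
  rw [PySem.List.pyGet?_natCast, PySem.List.pyGet?_natCast]
  simp only [Int.toNat_natCast]

lemma pvGet2_pvUpd_ne (mm : List (List Int)) (i j i' j' v : Int)
    (hi : 0 ≤ i) (hj : 0 ≤ j) (hi' : 0 ≤ i') (hj' : 0 ≤ j') (hne : (i, j) ≠ (i', j')) :
    pvGet2 (pvUpd mm i j v) i' j' = pvGet2 mm i' j' := by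
  rw [pvGet2_nonneg (pvUpd mm i j v) i' j' hi' hj', pvGet2_nonneg mm i' j' hi' hj']
  unfold pvUpd
  rw [List.getElem?_modify]
  by_cases h1 : i.toNat = i'.toNat
  · have hii : i = i' := by omega
    have hjj : j ≠ j' := fun h => hne (by rw [hii, h])
    cases h : mm[i'.toNat]? with
    | none => simp [h1]
    | some row =>
      have hne2 : ¬ (j.toNat = j'.toNat) := by omega
      simp [h1, hne2]
  · cases h : mm[i'.toNat]? <;> simp [h1]

-- one in-range clamped subtraction lowers the matrix sum by min v cell
lemma pvSumMapModify {α : Type} (h : α → Int) :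
    ∀ (l : List α) (n : Nat) (F : α → α), (hn : n < l.length) →
    ((l.modify n F).map h).sum = (l.map h).sum - h l[n] + h (F l[n]) := by
  intro l
  induction l with
  | nil => intro n F hn; simp at hn
  | cons a t ih =>
    intro n F hn
    cases n with
    | zero => simp [List.modify]; ring
    | succ k =>
      have hk : k < t.length := by simpa using hn
      simp only [List.modify_succ_cons, List.map_cons, List.sum_cons, List.getElem_cons_succ]
      rw [ih k F hk]; ring

lemma pvSumMatrix_pvUpd (mm : List (List Int)) (i j v : Int)
    (hi : 0 ≤ i) (hilt : i < (mm.length : Int))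
    (hj : 0 ≤ j) (hjlt : j < ((mm[i.toNat]?.getD []).length : Int)) :
    pvSumMatrix (pvUpd mm i j v) = pvSumMatrix mm - min v (pvGet2 mm i j) := by
  have hn : i.toNat < mm.length := by omega
  have hrow : mm[i.toNat]?.getD [] = mm[i.toNat] := by
    rw [List.getElem?_eq_getElem hn]; rfl
  have hjn : j.toNat < mm[i.toNat].length := by rw [hrow] at hjlt; omega
  rw [pvSumMatrix_eq, pvSumMatrix_eq, pvGet2_nonneg mm i j hi hj]
  unfold pvUpd
  rw [pvSumMapModify List.sum mm i.toNat _ hn]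
  have hs : (mm[i.toNat].modify j.toNat (fun x => if x - v < 0 then 0 else x - v)).sum
      = mm[i.toNat].sum - mm[i.toNat][j.toNat]
        + (if mm[i.toNat][j.toNat] - v < 0 then 0 else mm[i.toNat][j.toNat] - v) := by
    have := pvSumMapModify id mm[i.toNat] j.toNat (fun x => if x - v < 0 then 0 else x - v) hjn
    simpa using this
  rw [hs, hrow, List.getElem?_eq_getElem hjn]
  simp only [Option.getD_some]
  by_cases hc : mm[i.toNat][j.toNat] - v < 0 <;> simp [hc] <;> omega

-- the shape of the matrix is unchanged by an update
lemma pvUpd_shape (mm : List (List Int)) (i j v : Int) (k : Nat) :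
    ((pvUpd mm i j v)[k]?.getD []).length = (mm[k]?.getD []).length ∧
    (pvUpd mm i j v).length = mm.length := by
  refine ⟨?_, List.length_modify ..⟩
  unfold pvUpd
  rw [List.getElem?_modify]
  cases h : mm[k]? with
  | none => simp
  | some row => by_cases h1 : i.toNat = k <;> simp [h1, List.length_modify]

-- main fold lemma: bombing a list of pairwise-distinct in-range cells = total minus the per-cell reductions
lemma pvBombFold (g : Int × Int → Prop) [DecidablePred g] (v : Int) :
    ∀ (ps : List (Int × Int)) (mm : List (List Int)),
    ps.Pairwise (fun a b => a ≠ b) →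
    (∀ p ∈ ps, g p → 0 ≤ p.1 ∧ p.1 < (mm.length : Int) ∧ 0 ≤ p.2 ∧
        p.2 < ((mm[p.1.toNat]?.getD []).length : Int)) →
    pvSumMatrix (ps.foldl (fun mm p => if g p then pvUpd mm p.1 p.2 v else mm) mm)
      = pvSumMatrix mm - (ps.map (fun p => if g p then min v (pvGet2 mm p.1 p.2) else 0)).sum := by
  intro ps
  induction ps with
  | nil => intro mm _ _; simp
  | cons p t ih =>
    intro mm hpw hin
    have hpw' := List.pairwise_cons.mp hpw
    by_cases hg : g p
    · have hp := hin p (List.mem_cons_self ..) hg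
      have hupd := pvSumMatrix_pvUpd mm p.1 p.2 v hp.1 hp.2.1 hp.2.2.1 hp.2.2.2
      have hshape := fun k => pvUpd_shape mm p.1 p.2 v k
      have hin' : ∀ q ∈ t, g q → 0 ≤ q.1 ∧ q.1 < ((pvUpd mm p.1 p.2 v).length : Int) ∧
          0 ≤ q.2 ∧ q.2 < (((pvUpd mm p.1 p.2 v)[q.1.toNat]?.getD []).length : Int) := by
        intro q hq hgq
        obtain ⟨h1, h2, h3, h4⟩ := hin q (List.mem_cons_of_mem _ hq) hgq
        refine ⟨h1, ?_, h3, ?_⟩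
        · rw [(hshape 0).2]; exact h2
        · rw [(hshape q.1.toNat).1]; exact h4
      simp only [List.foldl_cons, if_pos hg, List.map_cons, List.sum_cons]
      rw [ih (pvUpd mm p.1 p.2 v) hpw'.2 hin', hupd]
      have hmap : t.map (fun q => if g q then min v (pvGet2 (pvUpd mm p.1 p.2 v) q.1 q.2) else 0)
          = t.map (fun q => if g q then min v (pvGet2 mm q.1 q.2) else 0) := by
        apply List.map_congr_left
        intro q hq
        by_cases hgq : g q
        · simp only [if_pos hgq]
          obtain ⟨h1, h2, h3, h4⟩ := hin q (List.mem_cons_of_mem _ hq) hgq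
          have hne : (p.1, p.2) ≠ (q.1, q.2) := by
            have hpq := hpw'.1 q hq
            intro hcontra; apply hpq; cases p; cases q; simpa using hcontra
          rw [pvGet2_pvUpd_ne mm p.1 p.2 q.1 q.2 v hp.1 hp.2.2.1 h1 h3 hne]
        · simp [hgq]
      rw [hmap]; ring
    · simp only [List.foldl_cons, if_neg hg, List.map_cons, List.sum_cons]
      rw [ih mm hpw'.2 (fun q hq => hin q (List.mem_cons_of_mem _ hq))]
      ring

-- folding f over a list built by append-if = a guarded fold over the candidates
lemma pvFoldBuild {α β : Type} (g : β → Prop) [DecidablePred g] (f : α → β → α) :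
    ∀ (cs L : List β) (z : α),
    ((cs.foldl (fun res p => if g p then res ++ [p] else res) L).foldl f z)
      = cs.foldl (fun z p => if g p then f z p else z) (L.foldl f z) := by
  intro cs
  induction cs with
  | nil => intro L z; rfl
  | cons c t ih =>
    intro L z
    by_cases h : g c <;>
      simp only [List.foldl_cons, h, ite_true, ite_false, ih, List.foldl_append, List.foldl_nil]

-- lookup in the positions dict built by the double range/insert loop
lemma pvPositionsInner (m : List (List Int)) (r c i : Int) :
    ∀ (js : List Int) (d : PySem.Dict (Int × Int) Int),
    (js.foldl (fun d j => d.insert (i, j) (pvGet2 m i j)) d).getD (r, c) 0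
      = if i = r ∧ c ∈ js then pvGet2 m r c else d.getD (r, c) 0 := by
  intro js
  induction js with
  | nil => intro d; simp
  | cons j t ih =>
    intro d
    rw [List.foldl_cons, ih, PySem.Dict.getD_insert]
    by_cases h1 : i = r
    · by_cases h2 : c ∈ t
      · simp [h1, h2]
      · by_cases h3 : c = j
        · simp [h1, h3]
        · simp [h1, h2, h3, Prod.ext_iff]
    · simp [h1, Prod.ext_iff]
      intro h; exact absurd h.symm h1

lemma pvPositionsGetD (m : List (List Int)) (rows cols r c : Int)
    (hr : 0 ≤ r ∧ r < rows) (hc : 0 ≤ c ∧ c < cols) :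
    ((PySem.List.pyRange 0 rows 1).foldl (fun d i =>
        (PySem.List.pyRange 0 cols 1).foldl (fun d j => d.insert (i, j) (pvGet2 m i j)) d)
        PySem.Dict.empty).getD (r, c) 0 = pvGet2 m r c := by
  have houter : ∀ (is : List Int) (d : PySem.Dict (Int × Int) Int),
      (is.foldl (fun d i =>
        (PySem.List.pyRange 0 cols 1).foldl (fun d j => d.insert (i, j) (pvGet2 m i j)) d) d).getD (r, c) 0
      = if r ∈ is ∧ c ∈ PySem.List.pyRange 0 cols 1 then pvGet2 m r c else d.getD (r, c) 0 := by
    intro is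
    induction is with
    | nil => intro d; simp
    | cons i t ih =>
      intro d
      rw [List.foldl_cons, ih, pvPositionsInner]
      by_cases h1 : r ∈ t <;> by_cases h2 : c ∈ PySem.List.pyRange 0 cols 1 <;>
        by_cases h3 : i = r
      all_goals first
        | (subst h3; simp [h1, h2])
        | (have h3' : r ≠ i := fun h => h3 h.symm; simp [h1, h2, h3, h3'])
  rw [houter]
  have : r ∈ PySem.List.pyRange 0 rows 1 ∧ c ∈ PySem.List.pyRange 0 cols 1 := by
    constructor <;> rw [PySem.List.mem_pyRange_one] <;> omega
  simp [this]

-- a guarded accumulating fold is the sum of a guarded map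
lemma pvFoldAddIf {β : Type} (g : β → Prop) [DecidablePred g] (f : β → Int) :
    ∀ (l : List β) (a : Int),
    l.foldl (fun red p => if g p then red + f p else red) a
      = a + (l.map (fun p => if g p then f p else 0)).sum := by
  intro l
  induction l with
  | nil => intro a; simp
  | cons p t ih => intro a; by_cases h : g p <;> simp [h, ih, add_assoc]

-- per-cell equality: bomb-and-resum at (r, c) = total minus the neighbour reductions
lemma pvCell (m : List (List Int)) (r c : Int) (hpre : Pre_matrix_bombing_plan m)
    (hr : 0 ≤ r) (hr2 : r < (m.length : Int)) (_hc : 0 ≤ c)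
    (_hc2 : c < (((PySem.List.pyGet? m 0).getD []).length : Int)) :
    pvSumMatrix ((pvFindNeighbors r c (m.length : Int)
        (((PySem.List.pyGet? m 0).getD []).length : Int)).foldl
        (fun mm p => pvUpd mm p.1 p.2 (pvGet2 m r c)) m)
      = pvSumMatrix m -
        [r - 1, r, r + 1].foldl (fun red i => [c - 1, c, c + 1].foldl (fun red j =>
          if (m.length : Int) > i ∧ i ≥ 0 ∧ (((PySem.List.pyGet? m 0).getD []).length : Int) > j ∧
              j ≥ 0 ∧ (i, j) ≠ (r, c)
          then red + min (pvGet2 m r c) (pvGet2 m i j) else red) red) 0 := by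
  have hA : pvFindNeighbors r c (m.length : Int) (((PySem.List.pyGet? m 0).getD []).length : Int)
      = (pvCand r c).foldl (fun res p =>
          if (m.length : Int) > p.1 ∧ p.1 ≥ 0 ∧ (((PySem.List.pyGet? m 0).getD []).length : Int) > p.2 ∧
              p.2 ≥ 0 ∧ (p.1, p.2) ≠ (r, c)
          then res ++ [p] else res) [] := rfl
  have hB : [r - 1, r, r + 1].foldl (fun red i => [c - 1, c, c + 1].foldl (fun red j =>
        if (m.length : Int) > i ∧ i ≥ 0 ∧ (((PySem.List.pyGet? m 0).getD []).length : Int) > j ∧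
            j ≥ 0 ∧ (i, j) ≠ (r, c)
        then red + min (pvGet2 m r c) (pvGet2 m i j) else red) red) (0 : Int)
      = (pvCand r c).foldl (fun red p =>
          if (m.length : Int) > p.1 ∧ p.1 ≥ 0 ∧ (((PySem.List.pyGet? m 0).getD []).length : Int) > p.2 ∧
              p.2 ≥ 0 ∧ (p.1, p.2) ≠ (r, c)
          then red + min (pvGet2 m r c) (pvGet2 m p.1 p.2) else red) 0 := rfl
  rw [hA, hB, pvFoldBuild, List.foldl_nil]
  rw [pvBombFold _ (pvGet2 m r c) (pvCand r c) m ?pw ?inr]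
  case pw =>
    simp [pvCand, List.pairwise_cons, Prod.ext_iff]
    refine ⟨?_, ?_, ?_, ?_, ?_, ?_, ?_⟩ <;> (intro a b h1 h2; omega)
  case inr =>
    intro p _ hg
    obtain ⟨h1, h2, h3, h4, _⟩ := hg
    refine ⟨h2, h1, h4, ?_⟩
    have hn : p.1.toNat < m.length := by omega
    have hmem : m[p.1.toNat]?.getD [] ∈ m := by
      rw [List.getElem?_eq_getElem hn]; exact List.getElem_mem hn
    have := hpre.2 _ hmem
    omega
  have hred := pvFoldAddIf
    (g := fun p : Int × Int => (m.length : Int) > p.1 ∧ p.1 ≥ 0 ∧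
      (((PySem.List.pyGet? m 0).getD []).length : Int) > p.2 ∧ p.2 ≥ 0 ∧ (p.1, p.2) ≠ (r, c))
    (fun p => min (pvGet2 m r c) (pvGet2 m p.1 p.2)) (pvCand r c) 0
  exact congrArg (fun x => pvSumMatrix m - x) (hred.trans (zero_add _)).symm

-- ===== VERDICT (by name: the statement is the Claim_ definition above) =====
theorem matrix_bombing_plan_spec : Claim_equal_matrix_bombing_plan := by
  intro m _ hpre
  show matrix_bombing_plan m = matrix_bombing_plan_alt m
  simp only [matrix_bombing_plan, matrix_bombing_plan_alt]
  have hres : (PySem.List.pyRange 0 (m.length : Int) 1).foldl (fun res row =>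
        (PySem.List.pyRange 0 (((PySem.List.pyGet? m 0).getD []).length : Int) 1).foldl (fun res column =>
          res.insert (row, column) (pvSumMatrix
            ((pvFindNeighbors row column (m.length : Int)
                (((PySem.List.pyGet? m 0).getD []).length : Int)).foldl
              (fun mm p => pvUpd mm p.1 p.2
                (((PySem.List.pyRange 0 (m.length : Int) 1).foldl (fun d i =>
                    (PySem.List.pyRange 0 (((PySem.List.pyGet? m 0).getD []).length : Int) 1).foldl
                      (fun d j => d.insert (i, j) (pvGet2 m i j)) d)
                    PySem.Dict.empty).getD (row, column) 0)) m))) res)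
        PySem.Dict.empty
      = (PySem.List.pyRange 0 (m.length : Int) 1).foldl (fun res r =>
        (PySem.List.pyRange 0 (((PySem.List.pyGet? m 0).getD []).length : Int) 1).foldl (fun res c =>
          res.insert (r, c) ((m.foldl (fun t row => row.foldl (fun t v => t + v) t) 0) -
            [r - 1, r, r + 1].foldl (fun red i => [c - 1, c, c + 1].foldl (fun red j =>
              if (m.length : Int) > i ∧ i ≥ 0 ∧
                  (((PySem.List.pyGet? m 0).getD []).length : Int) > j ∧ j ≥ 0 ∧ (i, j) ≠ (r, c)
              then red + min (pvGet2 m r c) (pvGet2 m i j) else red) red) 0)) res)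
        PySem.Dict.empty := by
    apply PySem.List.foldl_congr_mem
    intro acc r hrmem
    apply PySem.List.foldl_congr_mem
    intro acc2 c hcmem
    rw [PySem.List.mem_pyRange_one] at hrmem hcmem
    congr 1
    rw [pvPositionsGetD m _ _ r c hrmem hcmem]
    have htot : (m.foldl (fun t row => row.foldl (fun t v => t + v) t) 0 : Int) = pvSumMatrix m := rfl
    rw [htot, pvCell m r c hpre hrmem.1 hrmem.2 hcmem.1 hcmem.2]
  rw [hres]
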